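-- pv_equiv track=rewrite | github.com/BlueSkyHouseBuyers/marketingmachine-stage-4-extraction-service | main.py | compute_chunks
-- ===== SOURCE A (Python) =====
-- import math
--
-- def compute_chunks(page_count: int, chunk_size: int) -> list[tuple[int, int]]:
--     """
--     Split page_count into balanced chunks.
--     Returns list of (start_page_1indexed, end_page_1indexed) inclusive tuples.
--     """
--     if page_count <= chunk_size:
--         return [(1, page_count)]
--
--     num_chunks = math.ceil(page_count / chunk_size)
--     base_size = page_count // num_chunks
--     remainder = page_count % num_chunks
--
--     chunks: list[tuple[int, int]] = []
--     current = 1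
--     for i in range(num_chunks):
--         size = base_size + (1 if i < remainder else 0)
--         chunks.append((current, current + size - 1))
--         current += size
--
--     return chunks
-- ===== SOURCE B (Python) =====
-- def compute_chunks(page_count: int, chunk_size: int) -> list[tuple[int, int]]:
--     """
--     Split page_count into balanced chunks.
--     Returns list of (start_page_1indexed, end_page_1indexed) inclusive tuples.
--     """
--     if page_count <= chunk_size:
--         return [(1, page_count)]
--
--     result: list[tuple[int, int]] = []
--     start = 1
--     pages_left = page_count
--     chunks_left = -(-page_count // chunk_size)
--     while chunks_left > 0:
--         size = -(-pages_left // chunks_left)  # this chunk takes ceil(pages_left / chunks_left)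
--         result.append((start, start + size - 1))
--         start += size
--         pages_left -= size
--         chunks_left -= 1
--     return result
-- ===== Notes on version B (the rewrite author's own statement) =====
-- stated objective: alternative
-- what changed: A precomputes base_size/remainder and runs an accumulator loop appending base+0/1-sized chunks; B is a greedy recursive splitter with no base_size/remainder at all: each step takes ceil(pages_left/chunks_left) pages and recurses on the remaining pages and chunk count, which provably yields the same balanced partition.
-- outside the precondition, e.g. on compute_chunks(3, -5): A raises ZeroDivisionError, B returns []
import Mathlib
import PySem

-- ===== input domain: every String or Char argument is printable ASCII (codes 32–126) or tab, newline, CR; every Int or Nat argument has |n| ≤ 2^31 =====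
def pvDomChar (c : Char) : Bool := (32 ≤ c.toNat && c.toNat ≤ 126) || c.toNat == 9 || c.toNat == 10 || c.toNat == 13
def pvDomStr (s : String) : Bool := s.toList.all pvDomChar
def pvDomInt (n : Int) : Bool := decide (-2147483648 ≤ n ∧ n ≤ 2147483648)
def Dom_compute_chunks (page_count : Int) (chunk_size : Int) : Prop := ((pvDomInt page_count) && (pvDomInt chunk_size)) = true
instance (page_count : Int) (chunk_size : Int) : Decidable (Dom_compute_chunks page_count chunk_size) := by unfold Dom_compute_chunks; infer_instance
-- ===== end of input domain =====

-- B replaces A's base_size/remainder accumulator loop by a greedy recursive splitter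
-- (each chunk takes ceil(pages_left/chunks_left)); objective: alternative decomposition.

-- ===== PORT A =====
def compute_chunks (page_count : Int) (chunk_size : Int) : List (Int × Int) :=
  if page_count ≤ chunk_size then [(1, page_count)]
  else
    -- math.ceil(page_count / chunk_size): on Dom (|ints| ≤ 2^31) the float quotient cannot
    -- cross an integer, so this equals exact integer ceiling division -((-p) // c)
    let num_chunks := -(PySem.Int.floordiv (-page_count) chunk_size)
    let base_size := PySem.Int.floordiv page_count num_chunks
    let remainder := PySem.Int.mod page_count num_chunks
    ((PySem.List.pyRange 0 num_chunks 1).foldl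
      (fun (s : List (Int × Int) × Int) i =>
        let size := base_size + (if i < remainder then 1 else 0)
        (s.1 ++ [(s.2, s.2 + size - 1)], s.2 + size))
      ([], 1)).1

-- ===== PORT B =====
-- Source B's while loop: greedy splitter, accumulating `result`
def pvLoopB (result : List (Int × Int)) (start : Int) (pages_left : Int) (chunks_left : Int) : List (Int × Int) :=
  if chunks_left ≤ 0 then result
  else
    let size := -(PySem.Int.floordiv (-pages_left) chunks_left)
    pvLoopB (result ++ [(start, start + size - 1)]) (start + size) (pages_left - size) (chunks_left - 1)
termination_by chunks_left.toNat
decreasing_by omega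

def compute_chunks_alt (page_count : Int) (chunk_size : Int) : List (Int × Int) :=
  if page_count ≤ chunk_size then [(1, page_count)]
  else pvLoopB [] 1 page_count (-(PySem.Int.floordiv (-page_count) chunk_size))

-- ===== PRECONDITION & SPEC =====
-- Pre_ excludes exactly the inputs where Python A raises ZeroDivisionError: page_count > chunk_size
-- with chunk_size = 0, or chunk_size < 0 with 0 ≤ page_count < -chunk_size (ceil quotient 0);
-- on the latter region B returns [] while A raises (see cites).
def Pre_compute_chunks (page_count : Int) (chunk_size : Int) : Prop :=
  page_count ≤ chunk_size ∨
    (chunk_size ≠ 0 ∧ ¬(chunk_size < 0 ∧ 0 ≤ page_count ∧ page_count < -chunk_size))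
instance (page_count : Int) (chunk_size : Int) : Decidable (Pre_compute_chunks page_count chunk_size) := by unfold Pre_compute_chunks; infer_instance
def pvWitness_compute_chunks : Int × Int := (10, 3)

def Spec_compute_chunks (page_count : Int) (chunk_size : Int) (out : List (Int × Int)) : Prop := out = compute_chunks_alt page_count chunk_size
instance (page_count : Int) (chunk_size : Int) (out : List (Int × Int)) : Decidable (Spec_compute_chunks page_count chunk_size out) := by unfold Spec_compute_chunks; infer_instance

-- ===== CLAIM (what is proved, stated in full; the proofs are below) =====
def Claim_equal_compute_chunks : Prop := ∀ (page_count : Int) (chunk_size : Int), Dom_compute_chunks page_count chunk_size → Pre_compute_chunks page_count chunk_size → Spec_compute_chunks page_count chunk_size (compute_chunks page_count chunk_size)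

-- ===== LEMMAS AND PROOFS =====

-- Proof-side cons-building version of B's loop, and the bridge to the accumulator form.
def pvGoB (start : Int) (pages_left : Int) (chunks_left : Int) : List (Int × Int) :=
  if chunks_left ≤ 0 then []
  else
    let size := -(PySem.Int.floordiv (-pages_left) chunks_left)
    (start, start + size - 1) :: pvGoB (start + size) (pages_left - size) (chunks_left - 1)
termination_by chunks_left.toNat
decreasing_by omega

lemma loopB_eq_goB (acc : List (Int × Int)) (s p k : Int) :
    pvLoopB acc s p k = acc ++ pvGoB s p k := by
  induction acc, s, p, k using pvLoopB.induct with
  | case1 acc s p k h =>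
    rw [pvLoopB.eq_def, if_pos h, pvGoB.eq_def, if_pos h]
    simp
  | case2 acc s p k h size ih =>
    rw [pvLoopB.eq_def, if_neg h, pvGoB.eq_def, if_neg h]
    simp only [size] at ih ⊢
    rw [ih]
    simp

-- Closed form shared by both proofs: chunk i is (1 + i*base + min i rem, … + base - [i ≥ rem]).
def pvChunk (base rem i : Int) : Int × Int :=
  (1 + i * base + min i rem, 1 + i * base + min i rem + base - (if i < rem then 0 else 1))

-- A's accumulator loop produces the closed form.
lemma chunks_loop_eq (base rem : Int) :
    ∀ (n : Nat) (a : Int) (acc : List (Int × Int)),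
      (PySem.List.pyRange a (a + n) 1).foldl
        (fun (s : List (Int × Int) × Int) i =>
          let size := base + (if i < rem then 1 else 0)
          (s.1 ++ [(s.2, s.2 + size - 1)], s.2 + size))
        (acc, 1 + a * base + min a rem)
      = (acc ++ (PySem.List.pyRange a (a + n) 1).map (pvChunk base rem),
         1 + (a + n) * base + min (a + n) rem) := by
  intro n
  induction n with
  | zero =>
    intro a acc
    simp
  | succ n ih =>
    intro a acc
    have hcons : PySem.List.pyRange a (a + (n + 1 : Nat)) 1
        = a :: PySem.List.pyRange (a + 1) (a + (n + 1 : Nat)) 1 :=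
      PySem.List.pyRange_one_cons (by push_cast; omega)
    have hcur : 1 + a * base + min a rem + (base + (if a < rem then 1 else 0))
        = 1 + (a + 1) * base + min (a + 1) rem := by
      rcases lt_or_ge a rem with h | h
      · simp only [if_pos h, min_eq_left (by omega : a ≤ rem),
          min_eq_left (by omega : a + 1 ≤ rem)]; ring
      · simp only [if_neg (by omega : ¬ a < rem), min_eq_right (by omega : rem ≤ a),
          min_eq_right (by omega : rem ≤ a + 1)]; ring
    have hpair : (1 + a * base + min a rem) + (base + (if a < rem then 1 else 0)) - 1
        = (1 + a * base + min a rem) + base - (if a < rem then 0 else 1) := by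
      rcases lt_or_ge a rem with h | h <;> simp [h] <;> omega
    have hshift : a + (n + 1 : Nat) = (a + 1) + (n : Nat) := by push_cast; ring
    rw [hcons]
    simp only [List.foldl_cons, List.map_cons]
    rw [hpair, hcur, hshift,
      ih (a + 1) (acc ++ [(1 + a * base + min a rem, 1 + a * base + min a rem + base - (if a < rem then 0 else 1))])]
    simp [pvChunk]

-- B's greedy splitter produces the same closed form: with pages_left = n*base + (rem - min a rem)
-- and n chunks left, the greedy ceil size is base + [a < rem].
lemma goB_eq (base rem : Int) (_hrem : 0 ≤ rem) :
    ∀ (n : Nat) (a : Int), rem ≤ a + n →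
      pvGoB (1 + a * base + min a rem) ((n : Int) * base + (rem - min a rem)) (n : Int)
      = (PySem.List.pyRange a (a + n) 1).map (pvChunk base rem) := by
  intro n
  induction n with
  | zero =>
    intro a _
    rw [pvGoB.eq_def]
    simp
  | succ n ih =>
    intro a hle
    have hn : (0 : Int) < ((n + 1 : Nat) : Int) := by push_cast; omega
    have hr' : 0 ≤ rem - min a rem := by omega
    have hr'n : rem - min a rem ≤ ((n + 1 : Nat) : Int) := by
      rcases le_total a rem with h | h
      · rw [min_eq_left h]; push_cast; push_cast at hle; omega
      · rw [min_eq_right h]; omega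
    -- greedy size = base + [a < rem]
    have hsize : -(PySem.Int.floordiv (-(((n + 1 : Nat) : Int) * base + (rem - min a rem))) ((n + 1 : Nat) : Int))
        = base + (if a < rem then 1 else 0) := by
      rw [PySem.Int.neg_floordiv_neg_eq_iff_of_pos hn]
      rcases lt_or_ge a rem with h | h
      · have h1 : min a rem = a := min_eq_left (by omega)
        constructor
        · simp only [if_pos h, h1]; nlinarith [hn]
        · simp only [if_pos h, h1]; nlinarith [hr'n, h1]
      · have h1 : min a rem = rem := min_eq_right (by omega)
        simp only [if_neg (by omega : ¬ a < rem), h1]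
        constructor <;> nlinarith [hn]
    have hcons : PySem.List.pyRange a (a + (n + 1 : Nat)) 1
        = a :: PySem.List.pyRange (a + 1) (a + (n + 1 : Nat)) 1 :=
      PySem.List.pyRange_one_cons (by push_cast; omega)
    have hcur : 1 + a * base + min a rem + (base + (if a < rem then 1 else 0))
        = 1 + (a + 1) * base + min (a + 1) rem := by
      rcases lt_or_ge a rem with h | h
      · simp only [if_pos h, min_eq_left (by omega : a ≤ rem),
          min_eq_left (by omega : a + 1 ≤ rem)]; ring
      · simp only [if_neg (by omega : ¬ a < rem), min_eq_right (by omega : rem ≤ a),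
          min_eq_right (by omega : rem ≤ a + 1)]; ring
    have hpages : ((n + 1 : Nat) : Int) * base + (rem - min a rem) - (base + (if a < rem then 1 else 0))
        = (n : Int) * base + (rem - min (a + 1) rem) := by
      rcases lt_or_ge a rem with h | h
      · simp only [if_pos h, min_eq_left (by omega : a ≤ rem),
          min_eq_left (by omega : a + 1 ≤ rem)]; push_cast; ring
      · simp only [if_neg (by omega : ¬ a < rem), min_eq_right (by omega : rem ≤ a),
          min_eq_right (by omega : rem ≤ a + 1)]; push_cast; ring
    have hend : 1 + a * base + min a rem + (base + (if a < rem then 1 else 0)) - 1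
        = 1 + a * base + min a rem + base - (if a < rem then 0 else 1) := by
      rcases lt_or_ge a rem with h | h <;> simp [h] <;> omega
    have hshift : a + (n + 1 : Nat) = (a + 1) + (n : Nat) := by push_cast; ring
    rw [pvGoB.eq_def, if_neg (by omega)]
    simp only [hsize]
    rw [hcons]
    simp only [List.map_cons]
    rw [hend, hcur, hpages]
    have hdec : ((n + 1 : Nat) : Int) - 1 = (n : Int) := by omega
    rw [hdec, hshift, ih (a + 1) (by push_cast at hle ⊢; omega)]
    rfl

theorem compute_chunks_spec : Claim_equal_compute_chunks := by
  intro p c _hdom hpre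
  unfold Spec_compute_chunks compute_chunks compute_chunks_alt
  by_cases hle : p ≤ c
  · simp [hle]
  · simp only [if_neg hle]
    set num := -(PySem.Int.floordiv (-p) c) with hnum
    rcases lt_trichotomy num 0 with hneg | hzero | hpos
    · -- num_chunks < 0: empty range on A's side, immediate [] on B's side
      have h0 : num ≤ 0 := le_of_lt hneg
      rw [PySem.List.pyRange_one_eq_nil h0, pvLoopB.eq_def, if_pos h0]
      rfl
    · -- num_chunks = 0 is excluded by Pre_ (Python A raises there)
      exfalso
      rcases hpre with h | ⟨hc0, hnz⟩
      · exact hle h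
      rcases lt_trichotomy c 0 with hc | hc | hc
      · have h' : PySem.Int.floordiv (-p) c = PySem.Int.floordiv p (-c) := by
          simpa using PySem.Int.floordiv_neg_neg p (-c)
        have h0 : PySem.Int.floordiv p (-c) = 0 := by omega
        have hb := (PySem.Int.floordiv_eq_iff_of_pos (by omega : (0:Int) < -c)).mp h0
        simp at hb
        exact hnz ⟨hc, hb.1, hb.2⟩
      · exact hc0 hc
      · have hb := (PySem.Int.neg_floordiv_neg_eq_iff_of_pos (a := p) (b := c) (q := num) hc).mp
          hnum.symm
        rw [hzero] at hb
        simp at hb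
        omega
    · -- num_chunks > 0: both sides equal the closed-form map
      set base := PySem.Int.floordiv p num with hbase
      set rem := PySem.Int.mod p num with hrem0
      have hrem : 0 ≤ rem := PySem.Int.mod_nonneg p hpos
      have hid : base * num + rem = p := PySem.Int.floordiv_mul_add_mod p num
      have hbr := (PySem.Int.floordiv_eq_iff_of_pos hpos).mp hbase.symm
      have hremlt : rem < num := by nlinarith [hbr.2, hid]
      -- A's side
      have keyA := chunks_loop_eq base rem num.toNat 0 []
      rw [show ((0:Int) + ((num.toNat : Nat) : Int)) = num from by omega] at keyA
      rw [show ((1:Int) + 0 * base + min 0 rem) = 1 from by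
        rw [min_eq_left hrem]; ring] at keyA
      have hA := congrArg Prod.fst keyA
      simp only at hA
      rw [hA]
      -- B's side
      have keyB := goB_eq base rem hrem num.toNat 0 (by omega)
      have hcast : ((num.toNat : Nat) : Int) = num := by omega
      rw [hcast, show ((0:Int) + num) = num from by ring] at keyB
      rw [show ((1:Int) + 0 * base + min 0 rem) = 1 from by
        rw [min_eq_left hrem]; ring] at keyB
      rw [show (num * base + (rem - min 0 rem)) = p from by
        rw [min_eq_left hrem]; linear_combination hid] at keyB
      rw [loopB_eq_goB, keyB]
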